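-- pv_equiv track=rewrite | github.com/RAIRLab/DCEC_Library | cleaning.py | consolidate_parens
-- ===== SOURCE A (Python) =====
-- def consolidate_parens(expression):
--     """
--     Returns a string identical to the input except all superfluous parens are removed. It will also
--     put parens around the outside of the expression, if it does not already have them. It will not
--     detect a paren mismatch error.
--
--     :param expression:
--     :return:
--     """
--     expression = str(expression)
--     temp = "(" + expression + ")"
--     # list of indexes to delete
--     delete_list = []
--     # location of first paren
--     first_paren_a = 0
--     # looks through entire expression
--     while first_paren_a < len(temp):
--         # Find every occurance of a "(("
--         first_paren_a = temp.find("((", first_paren_a)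
--         first_paren_b = first_paren_a + 1
--         if first_paren_a == -1:
--             break
--         # Get the matching close parens.
--         second_paren_a = get_matching_close_paren(temp, first_paren_a)
--         second_paren_b = get_matching_close_paren(temp, first_paren_b)
--         # If both the open parens and the close parens match one set of parens is uneccesary,
--         # so delete them
--         if second_paren_a == second_paren_b + 1:
--             delete_list.append(first_paren_a)
--             delete_list.append(second_paren_a)
--         first_paren_a += 1
--     # Make the string to return
--     returner = ""
--     for i in range(0, len(temp)):
--         if i in delete_list:
--             continue
--         returner += temp[i]
--     return returner
--
-- def get_matching_close_paren(input_str, open_paren_index=0):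
--     """
--     Given a string, parse through it to find the index of the closing parenthesis that matches
--     the open parentheses given at some index
--
--     >>> get_matching_close_paren("(a b c)")
--     6
--     >>> get_matching_close_paren("(a (b) c)")
--     8
--     >>> get_matching_close_paren("(a (b) c)", 3)
--     5
--
--     :param input_str:
--     :param open_paren_index:
--     :return:
--     """
--     paren_counter = 1
--     current_index = open_paren_index
--     if current_index == -1:
--         return False
--     while paren_counter > 0:
--         close_index = input_str.find(")", current_index + 1)
--         open_index = input_str.find("(", current_index + 1)
--         if (open_index < close_index or close_index == -1) and open_index != -1:
--             current_index = open_index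
--             paren_counter += 1
--         elif(close_index < open_index or open_index == -1) and close_index != -1:
--             current_index = close_index
--             paren_counter -= 1
--         else:
--             return False
--     return current_index
-- ===== SOURCE B (Python) =====
-- def consolidate_parens(expression):
--     """Single stack pass computes all matching parens; superfluous pairs go into a
--     delete set; one-pass rebuild. Same result as the original."""
--     temp = "(" + str(expression) + ")"
--     match = {}
--     stack = []
--     for i, c in enumerate(temp):
--         if c == "(":
--             stack.append(i)
--         elif c == ")":
--             if stack:
--                 match[stack.pop()] = i
--     dead = set()
--     for i, j in match.items():
--         if temp[i + 1 : i + 2] == "(" and i + 1 in match and j == match[i + 1] + 1: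
--             dead.add(i)
--             dead.add(j)
--     return "".join(c for i, c in enumerate(temp) if i not in dead)
-- ===== Notes on version B (the rewrite author's own statement) =====
-- stated objective: alternative
-- what changed: A repeatedly searches for adjacent double open parens and rescans the string from each occurrence (twice) to locate the matching close parens, then rebuilds with a delete-list membership test per index; B computes every matching close paren in a single stack pass, collects the superfluous pairs in a set, and rebuilds in one pass.
import Mathlib
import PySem

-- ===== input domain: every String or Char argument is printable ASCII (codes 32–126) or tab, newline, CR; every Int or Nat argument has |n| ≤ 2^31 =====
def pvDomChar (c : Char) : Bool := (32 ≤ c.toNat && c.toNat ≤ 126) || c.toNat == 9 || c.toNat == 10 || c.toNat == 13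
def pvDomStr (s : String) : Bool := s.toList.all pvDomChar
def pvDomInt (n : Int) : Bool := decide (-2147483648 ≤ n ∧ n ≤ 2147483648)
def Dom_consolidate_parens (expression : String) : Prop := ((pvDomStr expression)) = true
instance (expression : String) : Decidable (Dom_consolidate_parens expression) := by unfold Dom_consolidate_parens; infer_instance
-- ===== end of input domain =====

-- B replaces A's repeated find-and-rescan paren matching (a rescan per "((" occurrence,
-- plus a per-index membership rebuild) by ONE stack pass computing every matching close
-- paren, a set of indices to delete, and a single rebuild pass; objective: alternative.

-- ===== PORT A =====
-- Python's `second_paren_a == second_paren_b + 1` compares False (our `none`) numerically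
-- as 0; this helper is that numeric reading of a possibly-False value.
def pyFalseAsZero (o : Option Int) : Int := o.getD 0

-- the `while paren_counter > 0` loop of get_matching_close_paren; `fuel` is only a
-- termination guard (current_index strictly increases below the string length, so
-- `input_str.length + 1` steps are never exhausted on the calls A makes)
def get_matching_close_paren_loop (input_str : List Char) (fuel : Nat)
    (paren_counter current_index : Int) : Option Int :=
  if ¬ paren_counter > 0 then some current_index
  else
    match fuel with
    | 0 => none
    | fuel + 1 =>
      let close_index := PySem.Chars.findFrom input_str [')'] (current_index + 1)
      let open_index := PySem.Chars.findFrom input_str ['('] (current_index + 1)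
      if (open_index < close_index ∨ close_index = -1) ∧ open_index ≠ -1 then
        get_matching_close_paren_loop input_str fuel (paren_counter + 1) open_index
      else if (close_index < open_index ∨ open_index = -1) ∧ close_index ≠ -1 then
        get_matching_close_paren_loop input_str fuel (paren_counter - 1) close_index
      else none

-- none = Python's `False`
def get_matching_close_paren (input_str : List Char) (open_paren_index : Int) : Option Int :=
  if open_paren_index = -1 then none
  else get_matching_close_paren_loop input_str (input_str.length + 1) 1 open_paren_index

-- the `while first_paren_a < len(temp)` loop building delete_list (fuel: same guard idea;
-- first_paren_a strictly increases each iteration)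
def consolidate_loop (temp : List Char) (fuel : Nat) (first_paren_a : Int)
    (delete_list : List Int) : List Int :=
  if ¬ first_paren_a < (temp.length : Int) then delete_list
  else
    match fuel with
    | 0 => delete_list
    | fuel + 1 =>
      let fpa := PySem.Chars.findFrom temp ['(', '('] first_paren_a
      if fpa = -1 then delete_list
      else
        let first_paren_b := fpa + 1
        let second_paren_a := get_matching_close_paren temp fpa
        let second_paren_b := get_matching_close_paren temp first_paren_b
        let delete_list' :=
          if pyFalseAsZero second_paren_a = pyFalseAsZero second_paren_b + 1 then
            delete_list ++ [fpa, pyFalseAsZero second_paren_a]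
          else delete_list
        consolidate_loop temp fuel (fpa + 1) delete_list'

def consolidate_parens (expression : String) : String :=
  let temp : List Char := '(' :: expression.toList ++ [')']   -- "(" + expression + ")"
  let delete_list := consolidate_loop temp (temp.length + 1) 0 []
  -- for i in range(0, len(temp)): if i in delete_list: continue; returner += temp[i]
  let returner := (PySem.List.pyRange 0 (temp.length : Int)).foldl
    (fun acc i =>
      if i ∈ delete_list then acc
      else match PySem.List.pyGet? temp i with
           | some c => acc ++ [c]
           | none => acc) []
  String.ofList returner

-- ===== PORT B =====
-- one step of Source B's stack pass; the Lean list head is the Python list's append/pop end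
def bStep (s : List Int × PySem.Dict Int Int) (p : Int × Char) : List Int × PySem.Dict Int Int :=
  if p.2 = '(' then (p.1 :: s.1, s.2)
  else if p.2 = ')' then
    match s.1 with
    | [] => s
    | j :: rest => (rest, s.2.insert j p.1)
  else s

def consolidate_parens_alt (expression : String) : String :=
  let temp : List Char := '(' :: expression.toList ++ [')']   -- "(" + str(expression) + ")"
  let m := ((PySem.List.enumerate temp 0).foldl bStep ([], PySem.Dict.empty)).2
  let dead := m.items.foldl
    (fun (s : PySem.Set Int) (p : Int × Int) =>
      if PySem.List.slice temp (some (p.1 + 1)) (some (p.1 + 2)) = ['('] then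
        match m.get? (p.1 + 1) with
        | some v => if p.2 = v + 1 then (s.add p.1).add p.2 else s
        | none => s
      else s) PySem.Set.empty
  String.ofList ((PySem.List.enumerate temp 0).foldl
    (fun acc (p : Int × Char) => if dead.contains p.1 then acc else acc ++ [p.2]) [])

-- ===== PRECONDITION & SPEC =====
def Spec_consolidate_parens (expression : String) (out : String) : Prop := out = consolidate_parens_alt expression
instance (expression : String) (out : String) : Decidable (Spec_consolidate_parens expression out) := by unfold Spec_consolidate_parens; infer_instance

-- ===== CLAIM (what is proved, stated in full; the proofs are below) =====
def Claim_equal_consolidate_parens : Prop := ∀ (expression : String), Dom_consolidate_parens expression → Spec_consolidate_parens expression (consolidate_parens expression)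

-- ===== LEMMAS AND PROOFS =====

-- the char-by-char reading of A's matching loop: from position pos with open-paren
-- counter cnt ≥ 1, the position where the counter hits 0 on a ')'
def scanA : List Char → Nat → Nat → Option Nat
  | [], _, _ => none
  | c :: cs, pos, cnt =>
    if c = ')' then (if cnt = 1 then some pos else scanA cs (pos + 1) (cnt - 1))
    else if c = '(' then scanA cs (pos + 1) (cnt + 1)
    else scanA cs (pos + 1) cnt

-- the matching close paren of the '(' at index i
def mclose (l : List Char) (i : Nat) : Option Nat := scanA (l.drop (i + 1)) (i + 1) 1

-- "A deletes index x because of the '((' at i": both programs' deletion condition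
def DelAt (l : List Char) (i : Nat) (x : Int) : Prop :=
  ∃ a b : Nat, l[i]? = some '(' ∧ l[i + 1]? = some '(' ∧ mclose l i = some a ∧
    mclose l (i + 1) = some b ∧ a = b + 1 ∧ (x = (i : Int) ∨ x = (a : Int))

def Del (l : List Char) (x : Int) : Prop := ∃ i : Nat, DelAt l i x

def Occ (l : List Char) (i : Nat) : Prop := l[i]? = some '(' ∧ l[i+1]? = some '('

theorem prefix_singleton_drop (l : List Char) (x : Char) (k : Nat) :
    [x] <+: l.drop k ↔ l[k]? = some x := by
  rw [← List.head?_drop]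
  cases h : l.drop k with
  | nil => simp [List.IsPrefix]
  | cons c cs =>
    simp only [List.head?_cons]
    constructor
    · rintro ⟨t, ht⟩; simp at ht; simp [ht.1]
    · rintro hc; obtain rfl := Option.some_inj.mp hc; exact ⟨cs, rfl⟩

theorem prefix_pair_drop (l : List Char) (x y : Char) (k : Nat) :
    [x, y] <+: l.drop k ↔ l[k]? = some x ∧ l[k + 1]? = some y := by
  constructor
  · rintro ⟨t, ht⟩
    have h1 : l[k]? = some x := by
      rw [← List.head?_drop, ← ht]; rfl
    have h2 : l[k+1]? = some y := by
      rw [← List.head?_drop, ← List.tail_drop, ← ht]; rfl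
    exact ⟨h1, h2⟩
  · rintro ⟨h1, h2⟩
    have hk : k < l.length := (List.getElem?_eq_some_iff.mp h1).1
    have hd : l.drop k = x :: l.drop (k+1) := by
      rw [List.drop_eq_getElem_cons hk]
      congr 1
      simpa [hk] using h1
    have hk2 : k + 1 < l.length := (List.getElem?_eq_some_iff.mp h2).1
    have hd2 : l.drop (k+1) = y :: l.drop (k+2) := by
      rw [List.drop_eq_getElem_cons hk2]
      congr 1
      simpa [hk2] using h2
    exact ⟨l.drop (k+2), by rw [hd, hd2]; rfl⟩

theorem infix_drop_iff (sub l : List Char) (k : Nat) :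
    sub <:+: l.drop k ↔ ∃ m : Nat, k ≤ m ∧ sub <+: l.drop m := by
  constructor
  · intro h
    obtain ⟨j, hj⟩ := (PySem.Chars.exists_prefix_drop_iff_isIn sub (l.drop k)).mpr
      ((PySem.Chars.isIn_iff_infix sub (l.drop k)).mpr h)
    exact ⟨k + j, Nat.le_add_right _ _, by rwa [List.drop_drop] at hj⟩
  · rintro ⟨m, hkm, hm⟩
    have : sub <+: (l.drop k).drop (m - k) := by
      rw [List.drop_drop]
      have : k + (m - k) = m := by omega
      rwa [this]
    exact this.isInfix.trans (List.drop_suffix _ _).isInfix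

theorem ff_hit (l sub : List Char) (k : Nat) (hk : k ≤ l.length) (h : sub <+: l.drop k) :
    PySem.Chars.findFrom l sub (k : Int) = (k : Int) := by
  rw [PySem.Chars.findFrom_natCast l sub k hk]
  have hfind : PySem.Chars.find (l.drop k) sub = 0 := by
    have hinf : sub <:+: l.drop k := h.isInfix
    have hnn : 0 ≤ PySem.Chars.find (l.drop k) sub :=
      (PySem.Chars.find_nonneg_iff _ _).mpr hinf
    have hne : PySem.Chars.find (l.drop k) sub ≠ -1 := by omega
    obtain ⟨hpre, hmin⟩ := PySem.Chars.find_spec hnn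
    by_contra hne0
    have hpos : 0 < (PySem.Chars.find (l.drop k) sub).toNat := by omega
    exact hmin 0 hpos (by simpa using h)
  simp [hfind]

theorem ff_no_occ (l sub : List Char) (k : Nat) (hk : k ≤ l.length)
    (h : ∀ m : Nat, k ≤ m → ¬ sub <+: l.drop m) :
    PySem.Chars.findFrom l sub (k : Int) = -1 := by
  rw [PySem.Chars.findFrom_natCast_eq_neg_one_iff l sub k hk]
  intro hinf
  obtain ⟨m, hkm, hm⟩ := (infix_drop_iff sub l k).mp hinf
  exact h m hkm hm

theorem ff_char_result (l sub : List Char) (k : Nat) (hk : k ≤ l.length)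
    (h : PySem.Chars.findFrom l sub (k : Int) ≠ -1) :
    ∃ m : Nat, PySem.Chars.findFrom l sub (k : Int) = (m : Int) ∧ k ≤ m ∧
      sub <+: l.drop m ∧ ∀ i : Nat, k ≤ i → i < m → ¬ sub <+: l.drop i := by
  obtain ⟨hle, hpre, hmin⟩ := PySem.Chars.findFrom_natCast_spec l sub k hk h
  refine ⟨(PySem.Chars.findFrom l sub (k : Int)).toNat, ?_, ?_, hpre, hmin⟩
  · omega
  · omega

theorem ff_miss (l sub : List Char) (k : Nat) (hk : k < l.length) (h : ¬ sub <+: l.drop k) :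
    PySem.Chars.findFrom l sub (k : Int) = PySem.Chars.findFrom l sub ((k : Int) + 1) := by
  have hk1 : k + 1 ≤ l.length := hk
  have hcast : ((k : Int) + 1) = ((k + 1 : Nat) : Int) := by push_cast; ring
  rw [hcast]
  by_cases h2 : PySem.Chars.findFrom l sub ((k + 1 : Nat) : Int) = -1
  · rw [h2]
    have hno : ∀ m : Nat, k + 1 ≤ m → ¬ sub <+: l.drop m := by
      intro m hm
      rw [PySem.Chars.findFrom_natCast_eq_neg_one_iff l sub (k+1) hk1] at h2
      intro hpre
      exact h2 ((infix_drop_iff sub l (k+1)).mpr ⟨m, hm, hpre⟩)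
    apply ff_no_occ l sub k (le_of_lt hk)
    intro m hm
    rcases Nat.eq_or_lt_of_le hm with rfl | hlt
    · exact h
    · exact hno m hlt
  · obtain ⟨m2, he2, hge2, hpre2, hmin2⟩ := ff_char_result l sub (k+1) hk1 h2
    have h1ne : PySem.Chars.findFrom l sub (k : Int) ≠ -1 := by
      intro heq
      rw [PySem.Chars.findFrom_natCast_eq_neg_one_iff l sub k (le_of_lt hk)] at heq
      exact heq ((infix_drop_iff sub l k).mpr ⟨m2, by omega, hpre2⟩)
    obtain ⟨m1, he1, hge1, hpre1, hmin1⟩ := ff_char_result l sub k (le_of_lt hk) h1ne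
    rw [he1, he2]
    have hm1ne : m1 ≠ k := fun hh => h (hh ▸ hpre1)
    have h12 : ¬ m2 < m1 := fun hh => hmin1 m2 (by omega) hh hpre2
    have h21 : ¬ m1 < m2 := fun hh => hmin2 m1 (by omega) hh hpre1
    congr 1; omega

theorem scanA_some_ge (cs : List Char) (pos cnt p : Nat) (h : scanA cs pos cnt = some p) :
    pos ≤ p := by
  induction cs generalizing pos cnt with
  | nil => simp [scanA] at h
  | cons c rest ih =>
    simp only [scanA] at h
    split_ifs at h with h1 h2 h3
    · cases h; omega
    · have := ih _ _ h; omega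
    · have := ih _ _ h; omega
    · have := ih _ _ h; omega

theorem scanA_some_lt (cs : List Char) (pos cnt p : Nat) (h : scanA cs pos cnt = some p) :
    p < pos + cs.length := by
  induction cs generalizing pos cnt with
  | nil => simp [scanA] at h
  | cons c rest ih =>
    simp only [scanA, List.length_cons] at h ⊢
    split_ifs at h with h1 h2 h3
    · cases h; omega
    all_goals (have := ih _ _ h; omega)

theorem mclose_lt (l : List Char) (i k : Nat) (h : mclose l i = some k) : k < l.length := by
  unfold mclose at h
  have := scanA_some_lt _ _ _ _ h
  have hlen : (l.drop (i+1)).length = l.length - (i+1) := List.length_drop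
  by_cases hi : i + 1 ≤ l.length
  · omega
  · rw [List.drop_eq_nil_of_le (by omega)] at h
    simp [scanA] at h

theorem gmLoop_nonpos (s : List Char) (fuel : Nat) (pc ci : Int) (h : ¬ pc > 0) :
    get_matching_close_paren_loop s fuel pc ci = some ci := by
  cases fuel <;> (rw [get_matching_close_paren_loop]; simp [h])

theorem gmLoop_eq_scan (l : List Char) (n : Nat) :
    ∀ fuel cnt cur : Nat, l.length - cur = n → cur < l.length → l.length ≤ cur + fuel →
      1 ≤ cnt →
      get_matching_close_paren_loop l fuel (cnt : Int) (cur : Int) =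
        (scanA (l.drop (cur + 1)) (cur + 1) cnt).map (fun p => (p : Int)) := by
  induction n using Nat.strong_induction_on with
  | _ n ih =>
  intro fuel cnt cur hn hcur hfuel hcnt
  obtain ⟨f, rfl⟩ : ∃ f, fuel = f + 1 := ⟨fuel - 1, by omega⟩
  have hcast1 : ((cur : Int) + 1) = ((cur + 1 : Nat) : Int) := by push_cast; ring
  have hgt : ¬ ¬ (cnt : Int) > 0 := by simp; omega
  rw [get_matching_close_paren_loop]
  simp only [hgt, if_false, hcast1]
  by_cases hend : cur + 1 = l.length
  · have hno : ∀ (x : Char) (m : Nat), cur + 1 ≤ m → ¬ [x] <+: l.drop m := by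
      intro x m hm hpre
      have h1 := (prefix_singleton_drop l x m).mp hpre
      have := (List.getElem?_eq_some_iff.mp h1).1
      omega
    rw [ff_no_occ l [')'] (cur+1) (by omega) (hno ')'),
        ff_no_occ l ['('] (cur+1) (by omega) (hno '(')]
    norm_num
    rw [List.drop_eq_nil_of_le (by omega)]
    simp [scanA]
  · have hlt : cur + 1 < l.length := by omega
    have hm1 : l.length - (cur+1) < n := by omega
    have hm2 : l.length ≤ (cur+1) + f := by omega
    have hm3 : l.length ≤ (cur+1) + (f+1) := by omega
    have hget : l[cur+1]? = some l[cur+1] := List.getElem?_eq_some_iff.mpr ⟨hlt, rfl⟩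
    have hdrop : l.drop (cur+1) = l[cur+1] :: l.drop (cur+2) := List.drop_eq_getElem_cons hlt
    have hfind_ne : ∀ (x : Char), l[cur+1] ≠ x →
        (PySem.Chars.findFrom l [x] ((cur+1 : Nat) : Int) = -1 ∨
         ∃ m : Nat, PySem.Chars.findFrom l [x] ((cur+1 : Nat) : Int) = (m : Int) ∧ cur + 1 < m) := by
      intro x hx
      by_cases hne : PySem.Chars.findFrom l [x] ((cur+1 : Nat) : Int) = -1
      · exact Or.inl hne
      · obtain ⟨m, hm, hge, hpre, _⟩ := ff_char_result l [x] (cur+1) (by omega) hne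
        refine Or.inr ⟨m, hm, ?_⟩
        rcases Nat.eq_or_lt_of_le hge with rfl | h
        · have h1 := (prefix_singleton_drop l x _).mp hpre
          rw [hget] at h1
          exact absurd (Option.some_inj.mp h1.symm).symm hx
        · exact h
    by_cases hc : l[cur+1] = '('
    · have hoi : PySem.Chars.findFrom l ['('] ((cur+1 : Nat) : Int) = ((cur+1 : Nat) : Int) :=
        ff_hit l ['('] (cur+1) (by omega)
          ((prefix_singleton_drop l '(' (cur+1)).mpr (by rw [hget, hc]))
      have hbranch : ∀ ci : Int,
          (ci = -1 ∨ ∃ m : Nat, ci = (m : Int) ∧ cur + 1 < m) →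
          ((((cur+1 : Nat) : Int) < ci ∨ ci = -1) ∧ ((cur+1 : Nat) : Int) ≠ -1) := by
        rintro ci (rfl | ⟨m, rfl, hm⟩)
        · exact ⟨Or.inr rfl, by omega⟩
        · exact ⟨Or.inl (by omega), by omega⟩
      rw [hoi, if_pos (hbranch _ (hfind_ne ')' (by simp [hc])))]
      have hcast2 : ((cnt : Int) + 1) = ((cnt + 1 : Nat) : Int) := by push_cast; ring
      rw [hcast2, ih (l.length - (cur+1)) hm1 f (cnt+1) (cur+1) rfl hlt hm2 (by omega)]
      rw [hdrop]
      simp only [scanA, hc]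
      rw [if_neg (show ¬ ('(' = ')') by decide)]
      rfl
    · by_cases hc2 : l[cur+1] = ')'
      · have hci : PySem.Chars.findFrom l [')'] ((cur+1 : Nat) : Int) = ((cur+1 : Nat) : Int) :=
          ff_hit l [')'] (cur+1) (by omega)
            ((prefix_singleton_drop l ')' (cur+1)).mpr (by rw [hget, hc2]))
        have hoi := hfind_ne '(' (by simp [hc])
        have hnb1 : ¬ ((PySem.Chars.findFrom l ['('] ((cur+1 : Nat) : Int) < PySem.Chars.findFrom l [')'] ((cur+1 : Nat) : Int) ∨ PySem.Chars.findFrom l [')'] ((cur+1 : Nat) : Int) = -1) ∧ PySem.Chars.findFrom l ['('] ((cur+1 : Nat) : Int) ≠ -1) := by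
          rw [hci]
          rcases hoi with h | ⟨m, hm, hmgt⟩
          · rw [h]; simp
          · rw [hm]; rintro ⟨h1 | h1, h2⟩ <;> omega
        have hb2 : ((PySem.Chars.findFrom l [')'] ((cur+1 : Nat) : Int) < PySem.Chars.findFrom l ['('] ((cur+1 : Nat) : Int) ∨ PySem.Chars.findFrom l ['('] ((cur+1 : Nat) : Int) = -1) ∧ PySem.Chars.findFrom l [')'] ((cur+1 : Nat) : Int) ≠ -1) := by
          rw [hci]
          rcases hoi with h | ⟨m, hm, hmgt⟩
          · rw [h]; exact ⟨Or.inr rfl, by omega⟩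
          · rw [hm]; exact ⟨Or.inl (by omega), by omega⟩
        rw [if_neg hnb1, if_pos hb2, hci]
        by_cases hcnt1 : cnt = 1
        · subst hcnt1
          rw [gmLoop_nonpos _ _ _ _ (by norm_num)]
          rw [hdrop]
          simp [scanA, hc2]
        · have hcast3 : ((cnt : Int) - 1) = ((cnt - 1 : Nat) : Int) := by omega
          rw [hcast3, ih (l.length - (cur+1)) hm1 f (cnt-1) (cur+1) rfl hlt hm2 (by omega)]
          rw [hdrop]
          simp [scanA, hc2, hcnt1]
      · have hmiss : ∀ (x : Char), l[cur+1] ≠ x →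
            PySem.Chars.findFrom l [x] ((cur+1 : Nat) : Int) =
            PySem.Chars.findFrom l [x] ((cur+2 : Nat) : Int) := by
          intro x hx
          have h1 := ff_miss l [x] (cur+1) hlt (by
            intro hpre
            have h1 := (prefix_singleton_drop l x _).mp hpre
            rw [hget] at h1
            exact hx (Option.some_inj.mp h1))
          rw [h1]
          congr 1
        have hIH : get_matching_close_paren_loop l (f+1) (cnt : Int) ((cur+1 : Nat) : Int) =
            (scanA (l.drop (cur + 2)) (cur + 2) cnt).map (fun p => (p : Int)) :=
          ih (l.length - (cur+1)) hm1 (f+1) cnt (cur+1) rfl hlt hm3 hcnt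
        rw [get_matching_close_paren_loop] at hIH
        simp only [hgt, if_false] at hIH
        have hcast4 : (((cur+1 : Nat) : Int) + 1) = ((cur+2 : Nat) : Int) := by push_cast; ring
        rw [hcast4] at hIH
        rw [hmiss ')' hc2, hmiss '(' hc]
        rw [hIH, hdrop]
        simp only [scanA, hc, hc2]
        norm_num

theorem gm_eq_mclose (l : List Char) (i : Nat) (hi : i < l.length) :
    get_matching_close_paren l (i : Int) = (mclose l i).map (fun p => (p : Int)) := by
  unfold get_matching_close_paren mclose
  rw [if_neg (by omega : ¬ (i : Int) = -1)]
  exact gmLoop_eq_scan l (l.length - i) (l.length + 1) 1 i rfl hi (by omega) (le_refl 1)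

theorem mclose_ge_of_open (l : List Char) (i a : Nat) (hi1 : i + 1 < l.length)
    (hopen : l[i+1]? = some '(') (ha : mclose l i = some a) : i + 2 ≤ a := by
  unfold mclose at ha
  rw [List.drop_eq_getElem_cons hi1] at ha
  have hopen' : l[i+1] = '(' := by simpa [hi1] using hopen
  rw [hopen'] at ha
  simp only [scanA, if_neg (by decide : ¬ ('(' : Char) = ')'), reduceIte] at ha
  exact scanA_some_ge _ _ _ _ ha

-- the value Python's `==` sees, on each shape gm can return
theorem gm_cond_iff (l : List Char) (i : Nat) (hi : i < l.length) (hi1 : i + 1 < l.length)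
    (hopen : l[i+1]? = some '(') :
    (pyFalseAsZero (get_matching_close_paren l (i : Int)) =
      pyFalseAsZero (get_matching_close_paren l ((i : Int) + 1)) + 1) ↔
    ∃ a b : Nat, mclose l i = some a ∧ mclose l (i+1) = some b ∧ a = b + 1 := by
  have hcast : ((i : Int) + 1) = ((i + 1 : Nat) : Int) := by push_cast; ring
  rw [gm_eq_mclose l i hi, hcast, gm_eq_mclose l (i+1) hi1]
  constructor
  · intro h
    cases ha : mclose l i with
    | none =>
      exfalso
      rw [ha] at h
      cases hb : mclose l (i+1) with
      | none => rw [hb] at h; simp [pyFalseAsZero] at h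
      | some b => rw [hb] at h; simp [pyFalseAsZero] at h; omega
    | some a =>
      rw [ha] at h
      cases hb : mclose l (i+1) with
      | none =>
        exfalso
        rw [hb] at h
        simp [pyFalseAsZero] at h
        have hge := mclose_ge_of_open l i a hi1 hopen ha
        omega
      | some b =>
        rw [hb] at h
        simp [pyFalseAsZero] at h
        exact ⟨a, b, rfl, rfl, by omega⟩
  · rintro ⟨a, b, ha, hb, he⟩
    rw [ha, hb]
    simp [pyFalseAsZero]
    omega

theorem DelAt_occ {l : List Char} {i : Nat} {x : Int} (h : DelAt l i x) : Occ l i := by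
  obtain ⟨a, b, h1, h2, _⟩ := h
  exact ⟨h1, h2⟩

theorem occ_iff_prefix (l : List Char) (i : Nat) :
    Occ l i ↔ ['(', '('] <+: l.drop i := (prefix_pair_drop l '(' '(' i).symm

theorem outer_mem (l : List Char) (n : Nat) :
    ∀ fuel k : Nat, ∀ dl : List Int, l.length - k = n → l.length + 1 ≤ k + fuel →
      ∀ x : Int, x ∈ consolidate_loop l fuel (k : Int) dl ↔
        x ∈ dl ∨ ∃ i : Nat, k ≤ i ∧ DelAt l i x := by
  induction n using Nat.strong_induction_on with
  | _ n ih =>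
  intro fuel k dl hn hfuel x
  have htail : l.length ≤ k → ∀ i : Nat, k ≤ i → ¬ DelAt l i x := by
    intro hbig i hki hd
    obtain ⟨a, b, h1, _⟩ := hd
    have := (List.getElem?_eq_some_iff.mp h1).1
    omega
  cases fuel with
  | zero =>
    have hbig : l.length ≤ k := by omega
    rw [consolidate_loop]
    have hguard : ¬ (k : Int) < (l.length : Int) := by omega
    rw [if_pos hguard]
    constructor
    · intro h; exact Or.inl h
    · rintro (h | ⟨i, hki, hd⟩)
      · exact h
      · exact absurd hd (htail hbig i hki)
  | succ f =>
  rw [consolidate_loop]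
  by_cases hk : k < l.length
  · rw [if_neg (by omega : ¬ ¬ (k : Int) < (l.length : Int))]
    by_cases hfpa : PySem.Chars.findFrom l ['(', '('] (k : Int) = -1
    · rw [hfpa, if_pos rfl]
      have hno : ∀ i : Nat, k ≤ i → ¬ DelAt l i x := by
        rw [PySem.Chars.findFrom_natCast_eq_neg_one_iff l _ k (by omega)] at hfpa
        intro i hki hd
        exact hfpa ((infix_drop_iff _ l k).mpr ⟨i, hki, (occ_iff_prefix l i).mp (DelAt_occ hd)⟩)
      constructor
      · intro h; exact Or.inl h
      · rintro (h | ⟨i, hki, hd⟩)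
        · exact h
        · exact absurd hd (hno i hki)
    · obtain ⟨m, hm, hkm, hpre, hmin⟩ := ff_char_result l ['(', '('] k (by omega) hfpa
      rw [hm, if_neg (by omega : ¬ (m : Int) = -1)]
      simp only []
      obtain ⟨hm0, hm1⟩ := (prefix_pair_drop l '(' '(' m).mp hpre
      have hmlt : m < l.length := (List.getElem?_eq_some_iff.mp hm0).1
      have hm1lt : m + 1 < l.length := (List.getElem?_eq_some_iff.mp hm1).1
      have hcast : ((m : Int) + 1) = ((m + 1 : Nat) : Int) := by push_cast; ring
      have hrec : ∀ dl' : List Int, x ∈ consolidate_loop l f ((m : Int) + 1) dl' ↔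
          x ∈ dl' ∨ ∃ i : Nat, m + 1 ≤ i ∧ DelAt l i x := by
        intro dl'
        rw [hcast]
        exact ih (l.length - (m+1)) (by omega) f (m+1) dl' rfl (by omega) x
      have hnomid : ∀ i : Nat, k ≤ i → i < m → ¬ DelAt l i x := by
        intro i h1 h2 hd
        exact hmin i h1 h2 ((occ_iff_prefix l i).mp (DelAt_occ hd))
      by_cases hcond : pyFalseAsZero (get_matching_close_paren l (m : Int)) =
          pyFalseAsZero (get_matching_close_paren l ((m : Int) + 1)) + 1
      · obtain ⟨a, b, ha, hb, hab⟩ := (gm_cond_iff l m hmlt hm1lt hm1).mp hcond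
        have hval : pyFalseAsZero (get_matching_close_paren l (m : Int)) = (a : Int) := by
          rw [gm_eq_mclose l m hmlt, ha]; rfl
        rw [if_pos hcond, hrec, hval]
        constructor
        · rintro (hmem | ⟨i, hi, hd⟩)
          · rcases List.mem_append.mp hmem with h | h
            · exact Or.inl h
            · simp only [List.mem_cons] at h
              exact Or.inr ⟨m, hkm, a, b, hm0, hm1, ha, hb, hab, by tauto⟩
          · exact Or.inr ⟨i, by omega, hd⟩
        · rintro (h | ⟨i, hi, hd⟩)
          · exact Or.inl (List.mem_append.mpr (Or.inl h))
          · rcases Nat.lt_trichotomy i m with hlt | rfl | hgt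
            · exact absurd hd (hnomid i hi hlt)
            · obtain ⟨a', b', _, _, ha', hb', hab', hx⟩ := hd
              rw [ha] at ha'; rw [hb] at hb'
              cases ha'; cases hb'
              refine Or.inl (List.mem_append.mpr (Or.inr ?_))
              simpa using hx
            · exact Or.inr ⟨i, by omega, hd⟩
      · rw [if_neg hcond, hrec]
        have hnotm : ¬ DelAt l m x := by
          rintro ⟨a, b, _, _, ha, hb, hab, _⟩
          exact hcond ((gm_cond_iff l m hmlt hm1lt hm1).mpr ⟨a, b, ha, hb, hab⟩)
        constructor
        · rintro (h | ⟨i, hi, hd⟩)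
          · exact Or.inl h
          · exact Or.inr ⟨i, by omega, hd⟩
        · rintro (h | ⟨i, hi, hd⟩)
          · exact Or.inl h
          · rcases Nat.lt_trichotomy i m with hlt | rfl | hgt
            · exact absurd hd (hnomid i hi hlt)
            · exact absurd hd hnotm
            · exact Or.inr ⟨i, by omega, hd⟩
  · rw [if_pos (by omega : ¬ (k : Int) < (l.length : Int))]
    constructor
    · intro h; exact Or.inl h
    · rintro (h | ⟨i, hki, hd⟩)
      · exact h
      · exact absurd hd (htail (by omega) i hki)

theorem scanA_some_close (cs : List Char) (pos cnt q : Nat) (h : scanA cs pos cnt = some q) :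
    cs[q - pos]? = some ')' := by
  induction cs generalizing pos cnt with
  | nil => simp [scanA] at h
  | cons c rest ih =>
    have hge := scanA_some_ge _ _ _ _ h
    simp only [scanA] at h
    split_ifs at h with h1 h2 h3
    · cases h; simp [h1]
    · have hge2 := scanA_some_ge _ _ _ _ h
      have := ih _ _ h
      rw [show q - pos = (q - (pos + 1)) + 1 by omega]
      simpa using this
    · have hge2 := scanA_some_ge _ _ _ _ h
      have := ih _ _ h
      rw [show q - pos = (q - (pos + 1)) + 1 by omega]
      simpa using this
    · have hge2 := scanA_some_ge _ _ _ _ h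
      have := ih _ _ h
      rw [show q - pos = (q - (pos + 1)) + 1 by omega]
      simpa using this

theorem scanA_drop_succ (l : List Char) (p c : Nat) (hp : p < l.length) :
    scanA (l.drop p) p c =
      if l[p] = ')' then (if c = 1 then some p else scanA (l.drop (p+1)) (p+1) (c-1))
      else if l[p] = '(' then scanA (l.drop (p+1)) (p+1) (c+1)
      else scanA (l.drop (p+1)) (p+1) c := by
  rw [List.drop_eq_getElem_cons hp]
  rfl

def PInv (l : List Char) (p : Nat) (st : List Int) (m : PySem.Dict Int Int) : Prop :=
  (∀ t (ht : t < st.length), ∃ i : Nat, st[t] = (i : Int) ∧ i < p ∧ l[i]? = some '(' ∧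
      mclose l i = scanA (l.drop p) p (t + 1)) ∧
  m.keys.Nodup ∧
  (∀ x v, m.get? x = some v ↔ ∃ j k : Nat, x = (j : Int) ∧ v = (k : Int) ∧ j < p ∧
      l[j]? = some '(' ∧ mclose l j = some k ∧ k < p) ∧
  (∀ i : Nat, i < p → l[i]? = some '(' →
      (∃ t, ∃ _ : t < st.length, st[t] = (i : Int)) ∨ ∃ v, m.get? (i : Int) = some v)

theorem PInv_step (l : List Char) (p : Nat) (st : List Int) (m : PySem.Dict Int Int)
    (hp : p < l.length) (h : PInv l p st m) :
    PInv l (p+1) (bStep (st, m) ((p : Int), l[p])).1 (bStep (st, m) ((p : Int), l[p])).2 := by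
  obtain ⟨S1, S2, S3, S4⟩ := h
  have hget : l[p]? = some l[p] := List.getElem?_eq_some_iff.mpr ⟨hp, rfl⟩
  by_cases hc : l[p] = '('
  · -- push
    have hb : bStep (st, m) ((p : Int), l[p]) = ((p : Int) :: st, m) := by
      simp [bStep, hc]
    rw [hb]
    refine ⟨?_, S2, ?_, ?_⟩
    · intro t ht
      cases t with
      | zero =>
        refine ⟨p, rfl, by omega, by rw [hget, hc], ?_⟩
        rfl
      | succ t' =>
        simp only [List.length_cons] at ht
        obtain ⟨i, hi1, hi2, hi3, hi4⟩ := S1 t' (by omega)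
        refine ⟨i, by simpa using hi1, by omega, hi3, ?_⟩
        rw [hi4, scanA_drop_succ l p (t'+1) hp, hc]
        rw [if_neg (by decide : ¬ ('(' : Char) = ')'), if_pos rfl]
    · intro x v
      rw [S3 x v]
      constructor
      · rintro ⟨j, k, rfl, rfl, h1, h2, h3, h4⟩
        exact ⟨j, k, rfl, rfl, by omega, h2, h3, by omega⟩
      · rintro ⟨j, k, rfl, rfl, h1, h2, h3, h4⟩
        refine ⟨j, k, rfl, rfl, ?_, h2, h3, ?_⟩
        · -- j ≠ p since mclose l p would start at p+1 and return ≥ p+1 > k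
          rcases Nat.lt_or_ge j p with hj | hj
          · omega
          · exfalso
            have : j = p := by omega
            subst this
            have := scanA_some_ge _ _ _ _ h3
            omega
        · -- k ≠ p since l[k] would be ')'
          rcases Nat.lt_or_ge k p with hk | hk
          · omega
          · exfalso
            have hkp : k = p := by omega
            subst hkp
            have hclose := scanA_some_close _ _ _ _ h3
            rw [List.getElem?_drop] at hclose
            rw [show j + 1 + (k - (j+1)) = k by
              have := scanA_some_ge _ _ _ _ h3; omega] at hclose
            exact absurd (Option.some_inj.mp (hget.symm.trans hclose)) (by rw [hc]; decide)
    · intro i hi hopen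
      rcases Nat.lt_or_ge i p with hip | hip
      · rcases S4 i hip hopen with ⟨t, ht, hst⟩ | hd
        · exact Or.inl ⟨t+1, by simpa using ht, by simpa using hst⟩
        · exact Or.inr hd
      · have : i = p := by omega
        subst this
        exact Or.inl ⟨0, by simp, rfl⟩
  · by_cases hc2 : l[p] = ')'
    · cases hst : st with
      | nil =>
        -- pop on empty stack: nothing happens
        subst hst
        have hb : bStep ([], m) ((p : Int), l[p]) = ([], m) := by
          simp [bStep, hc2]
        rw [hb]
        refine ⟨by simp, S2, ?_, ?_⟩
        · intro x v
          rw [S3 x v]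
          constructor
          · rintro ⟨j, k, rfl, rfl, h1, h2, h3, h4⟩
            exact ⟨j, k, rfl, rfl, by omega, h2, h3, by omega⟩
          · rintro ⟨j, k, rfl, rfl, h1, h2, h3, h4⟩
            have hjp : j < p := by
              rcases Nat.lt_or_ge j p with hj | hj
              · exact hj
              · exfalso
                have : j = p := by omega
                subst this
                exact absurd (Option.some_inj.mp (hget.symm.trans h2)) (by rw [hc2]; decide)
            refine ⟨j, k, rfl, rfl, hjp, h2, h3, ?_⟩
            rcases Nat.lt_or_ge k p with hk | hk
            · exact hk
            · exfalso
              have hkp : k = p := by omega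
              subst hkp
              rcases S4 j hjp h2 with ⟨t, ht, _⟩ | ⟨v, hv⟩
              · simp at ht
              · obtain ⟨j', k', hj', hk', _, _, h3', h4'⟩ := (S3 _ _).mp hv
                have : j' = j := by exact_mod_cast hj'.symm
                subst this
                rw [h3] at h3'; cases h3'; omega
        · intro i hi hopen
          have hip : i < p := by
            rcases Nat.lt_or_ge i p with hj | hj
            · exact hj
            · exfalso
              have : i = p := by omega
              subst this
              exact absurd (Option.some_inj.mp (hget.symm.trans hopen)) (by rw [hc2]; decide)
          rcases S4 i hip hopen with ⟨t, ht, _⟩ | hd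
          · simp at ht
          · exact Or.inr hd
      | cons j rest =>
        subst hst
        have hb : bStep (j :: rest, m) ((p : Int), l[p]) = (rest, m.insert j (p : Int)) := by
          simp [bStep, hc2]
        rw [hb]
        obtain ⟨j0, hj0e, hj0lt, hj0open, hj0m⟩ := S1 0 (by simp)
        simp only [List.getElem_cons_zero] at hj0e
        subst hj0e
        have hj0close : mclose l j0 = some p := by
          rw [hj0m, scanA_drop_succ l p 1 hp, hc2, if_pos rfl, if_pos rfl]
        refine ⟨?_, PySem.Dict.nodup_keys_insert m _ _ S2, ?_, ?_⟩
        · intro t ht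
          have ht' : t < rest.length := ht
          obtain ⟨i, hi1, hi2, hi3, hi4⟩ := S1 (t+1) (by simp only [List.length_cons]; omega)
          simp only [List.getElem_cons_succ] at hi1
          refine ⟨i, hi1, by omega, hi3, ?_⟩
          rw [hi4, scanA_drop_succ l p (t+1+1) hp, hc2,
            if_pos rfl, if_neg (by omega)]
          congr 1
        · intro x v
          rw [PySem.Dict.get?_insert m _ x _]
          constructor
          · intro hx
            split_ifs at hx with hxe
            · cases hx
              exact ⟨j0, p, hxe, rfl, by omega, hj0open, hj0close, by omega⟩
            · obtain ⟨j', k', h1, h2, h3, h4, h5, h6⟩ := (S3 x v).mp hx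
              exact ⟨j', k', h1, h2, by omega, h4, h5, by omega⟩
          · rintro ⟨j', k', rfl, rfl, h3, h4, h5, h6⟩
            have hjp : j' < p := by
              rcases Nat.lt_or_ge j' p with hj | hj
              · exact hj
              · exfalso
                have : j' = p := by omega
                subst this
                exact absurd (Option.some_inj.mp (hget.symm.trans h4)) (by rw [hc2]; decide)
            rcases Nat.lt_or_ge k' p with hk | hk
            · -- old entry; its key differs from j0
              have hne : (j' : Int) ≠ (j0 : Int) := by
                intro he
                have : j' = j0 := by exact_mod_cast he
                subst this
                rw [h5] at hj0close; cases hj0close; omega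
              rw [if_neg hne]
              exact (S3 _ _).mpr ⟨j', k', rfl, rfl, hjp, h4, h5, hk⟩
            · -- k' = p: must be the popped top j0
              have hkp : k' = p := by omega
              rw [hkp] at h5
              have hj'j0 : j' = j0 := by
                rcases S4 j' hjp h4 with ⟨t, ht, hstt⟩ | ⟨v, hv⟩
                · cases t with
                  | zero =>
                    simp only [List.getElem_cons_zero] at hstt
                    exact_mod_cast hstt.symm
                  | succ t' =>
                    exfalso
                    simp only [List.length_cons] at ht
                    obtain ⟨i, hi1, hi2, hi3, hi4⟩ := S1 (t'+1) ht
                    simp only [List.getElem_cons_succ] at hi1 hstt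
                    rw [hstt] at hi1
                    have : j' = i := by exact_mod_cast hi1
                    subst this
                    rw [h5, scanA_drop_succ l p (t'+1+1) hp, hc2,
                      if_pos rfl, if_neg (by omega)] at hi4
                    have := scanA_some_ge _ _ _ _ hi4.symm
                    omega
                · exfalso
                  obtain ⟨j'', k'', hj'', hk'', _, _, h3'', h4''⟩ := (S3 _ _).mp hv
                  have : j'' = j' := by exact_mod_cast hj''.symm
                  subst this
                  rw [h5] at h3''; cases h3''; omega
              subst hj'j0
              rw [if_pos rfl, hkp]
        · intro i hi hopen
          have hip : i < p := by
            rcases Nat.lt_or_ge i p with hj | hj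
            · exact hj
            · exfalso
              have : i = p := by omega
              subst this
              exact absurd (Option.some_inj.mp (hget.symm.trans hopen)) (by rw [hc2]; decide)
          rcases S4 i hip hopen with ⟨t, ht, hstt⟩ | ⟨v, hv⟩
          · cases t with
            | zero =>
              simp only [List.getElem_cons_zero] at hstt
              refine Or.inr ⟨(p : Int), ?_⟩
              rw [PySem.Dict.get?_insert, if_pos hstt.symm]
            | succ t' =>
              simp only [List.length_cons] at ht
              simp only [List.getElem_cons_succ] at hstt
              exact Or.inl ⟨t', show t' < rest.length by omega, hstt⟩
          · refine Or.inr ?_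
            rw [PySem.Dict.get?_insert]
            split_ifs with he
            · exact ⟨(p : Int), rfl⟩
            · exact ⟨v, hv⟩
    · -- other character: nothing happens
      have hb : bStep (st, m) ((p : Int), l[p]) = (st, m) := by
        simp [bStep, hc, hc2]
      rw [hb]
      refine ⟨?_, S2, ?_, ?_⟩
      · intro t ht
        obtain ⟨i, hi1, hi2, hi3, hi4⟩ := S1 t ht
        refine ⟨i, hi1, by omega, hi3, ?_⟩
        rw [hi4, scanA_drop_succ l p (t+1) hp,
          if_neg (by simpa using hc2), if_neg (by simpa using hc)]
      · intro x v
        rw [S3 x v]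
        constructor
        · rintro ⟨j, k, rfl, rfl, h1, h2, h3, h4⟩
          exact ⟨j, k, rfl, rfl, by omega, h2, h3, by omega⟩
        · rintro ⟨j, k, rfl, rfl, h1, h2, h3, h4⟩
          have hjp : j < p := by
            rcases Nat.lt_or_ge j p with hj | hj
            · exact hj
            · exfalso
              have : j = p := by omega
              subst this
              exact absurd (Option.some_inj.mp (hget.symm.trans h2)) hc
          refine ⟨j, k, rfl, rfl, hjp, h2, h3, ?_⟩
          rcases Nat.lt_or_ge k p with hk | hk
          · exact hk
          · exfalso
            have hkp : k = p := by omega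
            subst hkp
            have hclose := scanA_some_close _ _ _ _ h3
            rw [List.getElem?_drop] at hclose
            rw [show j + 1 + (k - (j+1)) = k by
              have := scanA_some_ge _ _ _ _ h3; omega] at hclose
            exact absurd (Option.some_inj.mp (hget.symm.trans hclose)) hc2
      · intro i hi hopen
        have hip : i < p := by
          rcases Nat.lt_or_ge i p with hj | hj
          · exact hj
          · exfalso
            have : i = p := by omega
            subst this
            exact absurd (Option.some_inj.mp (hget.symm.trans hopen)) hc
        exact S4 i hip hopen

theorem PInv_zero (l : List Char) : PInv l 0 [] PySem.Dict.empty := by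
  refine ⟨by simp, by simp [PySem.Dict.keys_empty], ?_, by omega⟩
  intro x v
  simp [PySem.Dict.get?_empty]

theorem bFold_inv (l : List Char) (p : Nat) (hp : p ≤ l.length) :
    PInv l p ((PySem.List.enumerate (l.take p) 0).foldl bStep ([], PySem.Dict.empty)).1
            ((PySem.List.enumerate (l.take p) 0).foldl bStep ([], PySem.Dict.empty)).2 := by
  induction p with
  | zero => simpa using PInv_zero l
  | succ q ih =>
    have hq : q < l.length := by omega
    have htake : l.take (q+1) = l.take q ++ [l[q]] := by
      rw [List.take_add_one]
      simp [List.getElem?_eq_getElem hq]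
    rw [htake, PySem.List.enumerate_append]
    have hlen : (l.take q).length = q := by simp [List.length_take]; omega
    have hone : PySem.List.enumerate [l[q]] ((0 : Int) + (l.take q).length) = [((q : Int), l[q])] := by
      rw [hlen]
      simp [PySem.List.enumerate]
    rw [hone, List.foldl_append]
    simp only [List.foldl_cons, List.foldl_nil]
    have := PInv_step l q _ _ hq (ih (by omega))
    convert this using 2

theorem bDict_mem (l : List Char) :
    (((PySem.List.enumerate l 0).foldl bStep ([], PySem.Dict.empty)).2).keys.Nodup ∧
    ∀ x v, (((PySem.List.enumerate l 0).foldl bStep ([], PySem.Dict.empty)).2).get? x = some v ↔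
      ∃ j k : Nat, x = (j : Int) ∧ v = (k : Int) ∧ l[j]? = some '(' ∧ mclose l j = some k := by
  have h := bFold_inv l l.length (le_refl _)
  rw [List.take_length] at h
  obtain ⟨_, S2, S3, _⟩ := h
  refine ⟨S2, ?_⟩
  intro x v
  rw [S3 x v]
  constructor
  · rintro ⟨j, k, rfl, rfl, _, h2, h3, _⟩
    exact ⟨j, k, rfl, rfl, h2, h3⟩
  · rintro ⟨j, k, rfl, rfl, h2, h3⟩
    exact ⟨j, k, rfl, rfl, (List.getElem?_eq_some_iff.mp h2).1, h2, h3, mclose_lt l j k h3⟩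

theorem slice_one_iff (l : List Char) (i : Nat) :
    PySem.List.slice l (some ((i : Int) + 1)) (some ((i : Int) + 2)) = ['('] ↔
      l[i+1]? = some '(' := by
  have h1 : ((i : Int) + 1) = ((i + 1 : Nat) : Int) := by push_cast; ring
  have h2 : ((i : Int) + 2) = (((i + 1 : Nat) : Int) + ((1 : Nat) : Int)) := by push_cast; ring
  rw [h1, h2, PySem.List.slice_natCast_add l (i+1) 1]
  cases h : l.drop (i+1) with
  | nil =>
    simp only [List.take_nil]
    rw [← List.head?_drop, h]
    simp
  | cons c cs =>
    have : l[i+1]? = some c := by rw [← List.head?_drop, h]; rfl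
    rw [this]
    simp [List.take]

theorem dead_fold_mem (l : List Char) (m : PySem.Dict Int Int) :
    ∀ (items : List (Int × Int)) (s : PySem.Set Int) (x : Int),
    x ∈ items.foldl
      (fun (s : PySem.Set Int) (p : Int × Int) =>
        if PySem.List.slice l (some (p.1 + 1)) (some (p.1 + 2)) = ['('] then
          match m.get? (p.1 + 1) with
          | some v => if p.2 = v + 1 then (s.add p.1).add p.2 else s
          | none => s
        else s) s ↔
    x ∈ s ∨ ∃ p ∈ items, (PySem.List.slice l (some (p.1 + 1)) (some (p.1 + 2)) = ['('] ∧
      ∃ v, m.get? (p.1 + 1) = some v ∧ p.2 = v + 1) ∧ (x = p.1 ∨ x = p.2) := by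
  intro items
  induction items with
  | nil => simp
  | cons q rest ih =>
    intro s x
    rw [List.foldl_cons]
    by_cases hs : PySem.List.slice l (some (q.1 + 1)) (some (q.1 + 2)) = ['(']
    · rw [if_pos hs]
      cases hg : m.get? (q.1 + 1) with
      | none =>
        rw [ih]
        simp only [List.mem_cons]
        constructor
        · rintro (h | h)
          · exact Or.inl h
          · obtain ⟨p, hp, hc, hx⟩ := h
            exact Or.inr ⟨p, Or.inr hp, hc, hx⟩
        · rintro (h | ⟨p, hp | hp, hc, hx⟩)
          · exact Or.inl h
          · exfalso
            subst hp
            obtain ⟨_, v, hv, _⟩ := hc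
            rw [hg] at hv
            cases hv
          · exact Or.inr ⟨p, hp, hc, hx⟩
      | some v =>
        simp only []
        by_cases he : q.2 = v + 1
        · rw [if_pos he, ih]
          simp only [List.mem_cons]
          constructor
          · rintro (h | h)
            · rcases (PySem.Set.mem_add _ _ _).mp h with h1 | h1
              · rcases (PySem.Set.mem_add _ _ _).mp h1 with h2 | h2
                · exact Or.inl h2
                · exact Or.inr ⟨q, Or.inl rfl, ⟨hs, v, hg, he⟩, Or.inl h2⟩
              · exact Or.inr ⟨q, Or.inl rfl, ⟨hs, v, hg, he⟩, Or.inr h1⟩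
            · obtain ⟨p, hp, hc, hx⟩ := h
              exact Or.inr ⟨p, Or.inr hp, hc, hx⟩
          · rintro (h | ⟨p, hp | hp, hc, hx⟩)
            · exact Or.inl ((PySem.Set.mem_add _ _ _).mpr (Or.inl ((PySem.Set.mem_add _ _ _).mpr (Or.inl h))))
            · subst hp
              rcases hx with hx | hx
              · exact Or.inl ((PySem.Set.mem_add _ _ _).mpr (Or.inl ((PySem.Set.mem_add _ _ _).mpr (Or.inr hx))))
              · exact Or.inl ((PySem.Set.mem_add _ _ _).mpr (Or.inr hx))
            · exact Or.inr ⟨p, hp, hc, hx⟩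
        · rw [if_neg he, ih]
          simp only [List.mem_cons]
          constructor
          · rintro (h | ⟨p, hp, hc, hx⟩)
            · exact Or.inl h
            · exact Or.inr ⟨p, Or.inr hp, hc, hx⟩
          · rintro (h | ⟨p, hp | hp, hc, hx⟩)
            · exact Or.inl h
            · exfalso
              subst hp
              obtain ⟨_, v', hv', he'⟩ := hc
              rw [hg] at hv'
              cases hv'
              exact he he'
            · exact Or.inr ⟨p, hp, hc, hx⟩
    · rw [if_neg hs, ih]
      simp only [List.mem_cons]
      constructor
      · rintro (h | ⟨p, hp, hc, hx⟩)
        · exact Or.inl h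
        · exact Or.inr ⟨p, Or.inr hp, hc, hx⟩
      · rintro (h | ⟨p, hp | hp, hc, hx⟩)
        · exact Or.inl h
        · exact absurd (hp ▸ hc.1) hs
        · exact Or.inr ⟨p, hp, hc, hx⟩

theorem deleteList_mem (l : List Char) (x : Int) :
    x ∈ consolidate_loop l (l.length + 1) 0 [] ↔ Del l x := by
  have h := outer_mem l l.length (l.length + 1) 0 [] (by simp) (by omega) x
  rw [show ((0 : Nat) : Int) = (0 : Int) from rfl] at h
  rw [h]
  simp [Del]

theorem dead_mem (l : List Char) (x : Int) :
    x ∈ (((PySem.List.enumerate l 0).foldl bStep ([], PySem.Dict.empty)).2).items.foldl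
      (fun (s : PySem.Set Int) (p : Int × Int) =>
        if PySem.List.slice l (some (p.1 + 1)) (some (p.1 + 2)) = ['('] then
          match (((PySem.List.enumerate l 0).foldl bStep ([], PySem.Dict.empty)).2).get? (p.1 + 1) with
          | some v => if p.2 = v + 1 then (s.add p.1).add p.2 else s
          | none => s
        else s) PySem.Set.empty ↔ Del l x := by
  set m := ((PySem.List.enumerate l 0).foldl bStep ([], PySem.Dict.empty)).2 with hm
  obtain ⟨hnodup, hchar⟩ := bDict_mem l
  rw [dead_fold_mem l m]
  simp only [PySem.Set.empty]
  constructor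
  · rintro (h | ⟨p, hp, ⟨hslice, v, hv, he⟩, hx⟩)
    · simp at h
    · obtain ⟨p1, p2⟩ := p
      simp only [] at hslice hv he hx
      have hget : m.get? p1 = some p2 := PySem.Dict.get?_of_mem_items m hp hnodup
      obtain ⟨j, k, rfl, rfl, hopen, hmc⟩ := (hchar _ _).mp hget
      obtain ⟨j', b, hj', rfl, hopen', hmc'⟩ := (hchar _ _).mp hv
      have hj'e : j' = j + 1 := by exact_mod_cast hj'.symm
      subst hj'e
      have hsl := (slice_one_iff l j).mp hslice
      refine ⟨j, k, b, hopen, hsl, hmc, hmc', by exact_mod_cast he, ?_⟩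
      rcases hx with hx | hx
      · exact Or.inl hx
      · exact Or.inr hx
  · rintro ⟨i, a, b, hopen, hopen1, hmc, hmc1, hab, hx⟩
    refine Or.inr ⟨((i : Int), (a : Int)), ?_, ⟨?_, (b : Int), ?_, ?_⟩, hx⟩
    · have hget : m.get? (i : Int) = some (a : Int) :=
        (hchar _ _).mpr ⟨i, a, rfl, rfl, hopen, hmc⟩
      exact PySem.Dict.mem_items_of_get?_eq_some m hget
    · exact (slice_one_iff l i).mpr hopen1
    · have : ((i : Int) + 1) = ((i + 1 : Nat) : Int) := by push_cast; ring
      rw [this]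
      exact (hchar _ _).mpr ⟨i + 1, b, rfl, rfl, hopen1, hmc1⟩
    · show ((a : Nat) : Int) = (b : Int) + 1
      exact_mod_cast hab

theorem rebuild_eq (l : List Char) (dl : List Int) (dead : PySem.Set Int)
    (h : ∀ x : Int, x ∈ dl ↔ x ∈ dead) :
    (PySem.List.pyRange 0 (l.length : Int)).foldl
      (fun acc i =>
        if i ∈ dl then acc
        else match PySem.List.pyGet? l i with
             | some c => acc ++ [c]
             | none => acc) [] =
    (PySem.List.enumerate l 0).foldl
      (fun acc (p : Int × Char) => if dead.contains p.1 then acc else acc ++ [p.2]) [] := by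
  rw [PySem.List.enumerate_eq_map_pyRange l ' ', List.foldl_map]
  have hlen : PySem.List.len l = (l.length : Int) := by simp
  rw [hlen]
  apply PySem.List.foldl_congr_mem
  intro acc i hi
  obtain ⟨h0, hlt⟩ := PySem.List.mem_pyRange_one.mp hi
  have hg : PySem.List.pyGet? l i = some l[i.toNat] := by
    rw [PySem.List.pyGet?_of_nonneg l h0]
    exact List.getElem?_eq_some_iff.mpr ⟨by omega, rfl⟩
  have hgd : PySem.List.pyGetD l i ' ' = l[i.toNat] :=
    PySem.List.pyGetD_eq_getElem l ' ' h0 hlt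
  simp only [hg, hgd]
  have hiff : i ∈ dl ↔ dead.contains i = true := (h i).trans (PySem.Set.contains_iff dead i).symm
  by_cases hmem : i ∈ dl
  · rw [if_pos hmem, if_pos (hiff.mp hmem)]
  · rw [if_neg hmem, if_neg (fun hh => hmem (hiff.mpr hh))]

theorem consolidate_parens_eq (expression : String) :
    consolidate_parens expression = consolidate_parens_alt expression := by
  unfold consolidate_parens consolidate_parens_alt
  simp only []
  apply congrArg String.ofList
  apply rebuild_eq
  intro x
  exact (deleteList_mem _ _).trans (dead_mem _ _).symm

-- ===== VERDICT (by name: the statement is the Claim_ definition above) =====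
theorem consolidate_parens_spec : Claim_equal_consolidate_parens := by
  intro expression _
  unfold Spec_consolidate_parens
  exact consolidate_parens_eq expression
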